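-- pv_equiv track=rewrite | github.com/Saketh-Chandra/Chanting_Techniques | Chanting Techinques/Source Code/dhandapatha.py | dhandapatha
-- ===== SOURCE A (Python) =====
-- def dhandapatha(s):
--     sm = list(map(str, s.split(" ")))
--     l = len(sm)
--     x=[]
--     for i in range(4):
--         gh = []
--         if (i == 0):
--             gh.append(sm[i])
--             gh.append(sm[i + 1])
--
--             gh.append(sm[i + 1])
--             gh.append(sm[i])
--
--             gh.append(sm[i])
--             gh.append(sm[i + 1])
--             gh.append(sm[i+2])
--
--             gh.append(sm[i+2])
--             gh.append(sm[i + 1])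
--             gh.append(sm[i])
--
--             x.append(gh)
--         elif (i == 1):
--             gh.append(sm[i - 1])
--             gh.append(sm[i])
--
--             gh.append(sm[i])
--             gh.append(sm[i + 1])
--
--             gh.append(sm[i + 1])
--             gh.append(sm[i + 2])
--
--             gh.append(sm[i + 2])
--             gh.append(sm[i + 1])
--             gh.append(sm[i])
--             gh.append(sm[i - 1])
--
--             gh.append(sm[i - 1])
--             gh.append(sm[i])
--
--             gh.append(sm[i])
--             gh.append(sm[i + 1])
--
--             x.append(gh)
--
--         elif (i == 2):
--             gh.append(sm[i])
--             gh.append(sm[i + 1])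
--             gh.append(sm[i + 1])
--             gh.append(sm[i + 2])
--
--             gh.append(sm[i + 2])
--             gh.append(sm[i + 1])
--             gh.append(sm[i])
--             gh.append(sm[i - 1])
--             gh.append(sm[i - 2])
--
--             x.append(gh)
--
--         elif (i == 3):
--             gh.append(sm[i - 3])
--             gh.append(sm[i - 2])
--
--             gh.append(sm[i - 2])
--             gh.append(sm[i - 1])
--
--             gh.append(sm[i - 1])
--             gh.append(sm[i])
--
--             gh.append(sm[i])
--             gh.append(sm[i + 1])
--
--             gh.append(sm[i + 1])
--             gh.append(sm[i + 2])
--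
--             gh.append(sm[i + 2])
--             gh.append(sm[i + 1])
--             gh.append(sm[i])
--             gh.append(sm[i-1])
--             gh.append(sm[i - 2])
--             gh.append(sm[i - 3])
--             x.append(gh)
--     return x
-- ===== SOURCE B (Python) =====
-- # B: compose each group from run/pair combinators (ascending slice, reversed slice,
-- # adjacent-pair walk) instead of per-element indexed appends.
-- def dhandapatha(s):
--     sm = s.split(" ")
--
--     def up(a, b):          # tokens a..b ascending, via slicing
--         return sm[a:b + 1]
--
--     def dn(a, b):          # tokens b..a descending, via reversed slice
--         return sm[a:b + 1][::-1]
--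
--     def pairs(a, b):       # adjacent-pair walk: a,a+1, a+1,a+2, ..., b-1,b
--         out = []
--         for j in range(a, b):
--             out += [sm[j], sm[j + 1]]
--         return out
--
--     return [
--         pairs(0, 1) + dn(0, 1) + up(0, 2) + dn(0, 2),
--         pairs(0, 3) + dn(0, 3) + pairs(0, 2),
--         pairs(2, 4) + dn(0, 4),
--         pairs(0, 5) + dn(0, 5),
--     ]
-- ===== Notes on version B (the rewrite author's own statement) =====
-- stated objective: simpler
-- what changed: Replaces the four-way if/elif branch of dozens of element-indexed appends by three small slice-based combinators (ascending run, reversed run, adjacent-pair walk) composed into the four groups.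
import Mathlib
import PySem

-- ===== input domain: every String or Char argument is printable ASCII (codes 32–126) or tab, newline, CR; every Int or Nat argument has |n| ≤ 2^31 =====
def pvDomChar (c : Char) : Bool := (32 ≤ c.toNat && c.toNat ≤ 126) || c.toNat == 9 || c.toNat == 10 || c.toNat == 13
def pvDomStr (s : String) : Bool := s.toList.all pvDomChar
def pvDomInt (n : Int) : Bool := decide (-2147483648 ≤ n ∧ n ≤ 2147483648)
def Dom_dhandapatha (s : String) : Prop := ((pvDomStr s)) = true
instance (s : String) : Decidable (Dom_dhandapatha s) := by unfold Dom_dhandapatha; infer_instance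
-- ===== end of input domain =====

-- B composes each group from slice-based run/pair combinators (ascending run, reversed run,
-- adjacent-pair walk) instead of A's per-branch element-indexed appends (simpler, same cost).

-- ===== PORT A =====
-- sm[i]; Pre_ guarantees every index used is in range (Python raises IndexError otherwise)
def pvGetA (sm : List String) (i : Int) : String := (PySem.List.pyGet? sm i).getD ""

def dhandapatha (s : String) : List (List String) :=
  let sm : List String := (PySem.Str.split? s " ").getD []
  let _l := sm.length
  (PySem.List.pyRange 0 4 1).foldl (fun x i =>
    let gh : List String := []
    if i == 0 then
      let gh := gh ++ [pvGetA sm i] ++ [pvGetA sm (i+1)]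
               ++ [pvGetA sm (i+1)] ++ [pvGetA sm i]
               ++ [pvGetA sm i] ++ [pvGetA sm (i+1)] ++ [pvGetA sm (i+2)]
               ++ [pvGetA sm (i+2)] ++ [pvGetA sm (i+1)] ++ [pvGetA sm i]
      x ++ [gh]
    else if i == 1 then
      let gh := gh ++ [pvGetA sm (i-1)] ++ [pvGetA sm i]
               ++ [pvGetA sm i] ++ [pvGetA sm (i+1)]
               ++ [pvGetA sm (i+1)] ++ [pvGetA sm (i+2)]
               ++ [pvGetA sm (i+2)] ++ [pvGetA sm (i+1)] ++ [pvGetA sm i] ++ [pvGetA sm (i-1)]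
               ++ [pvGetA sm (i-1)] ++ [pvGetA sm i]
               ++ [pvGetA sm i] ++ [pvGetA sm (i+1)]
      x ++ [gh]
    else if i == 2 then
      let gh := gh ++ [pvGetA sm i] ++ [pvGetA sm (i+1)] ++ [pvGetA sm (i+1)] ++ [pvGetA sm (i+2)]
               ++ [pvGetA sm (i+2)] ++ [pvGetA sm (i+1)] ++ [pvGetA sm i] ++ [pvGetA sm (i-1)] ++ [pvGetA sm (i-2)]
      x ++ [gh]
    else if i == 3 then
      let gh := gh ++ [pvGetA sm (i-3)] ++ [pvGetA sm (i-2)]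
               ++ [pvGetA sm (i-2)] ++ [pvGetA sm (i-1)]
               ++ [pvGetA sm (i-1)] ++ [pvGetA sm i]
               ++ [pvGetA sm i] ++ [pvGetA sm (i+1)]
               ++ [pvGetA sm (i+1)] ++ [pvGetA sm (i+2)]
               ++ [pvGetA sm (i+2)] ++ [pvGetA sm (i+1)] ++ [pvGetA sm i] ++ [pvGetA sm (i-1)]
               ++ [pvGetA sm (i-2)] ++ [pvGetA sm (i-3)]
      x ++ [gh]
    else x) []

-- ===== PORT B =====
-- combinators over sm (Source B's up/dn/pairs, transcribed with PySem slices)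
def pvUp (sm : List String) (a b : Int) : List String :=
  PySem.List.slice sm (some a) (some (b + 1))
def pvDn (sm : List String) (a b : Int) : List String :=
  (PySem.List.slice sm (some a) (some (b + 1))).reverse
-- pairs: out += [sm[j], sm[j+1]] for j in range(a,b); Pre_ keeps the indices in range
def pvGetB (sm : List String) (i : Int) : String := (PySem.List.pyGet? sm i).getD ""
def pvPairs (sm : List String) (a b : Int) : List String :=
  (PySem.List.pyRange a b 1).foldl
    (fun out j => out ++ [pvGetB sm j, pvGetB sm (j + 1)]) []

def dhandapatha_alt (s : String) : List (List String) :=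
  let sm : List String := (PySem.Str.split? s " ").getD []
  [ pvPairs sm 0 1 ++ pvDn sm 0 1 ++ pvUp sm 0 2 ++ pvDn sm 0 2,
    pvPairs sm 0 3 ++ pvDn sm 0 3 ++ pvPairs sm 0 2,
    pvPairs sm 2 4 ++ pvDn sm 0 4,
    pvPairs sm 0 5 ++ pvDn sm 0 5 ]

-- ===== PRECONDITION & SPEC =====
-- Pre_: at least 6 space-separated tokens; on fewer, Python A raises IndexError (sm[5] out of range).
def Pre_dhandapatha (s : String) : Prop := 6 ≤ ((PySem.Str.split? s " ").getD []).length
instance (s : String) : Decidable (Pre_dhandapatha s) := by unfold Pre_dhandapatha; infer_instance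
def pvWitness_dhandapatha : String := "a b c d e f"

def Spec_dhandapatha (s : String) (out : List (List String)) : Prop := out = dhandapatha_alt s
instance (s : String) (out : List (List String)) : Decidable (Spec_dhandapatha s out) := by unfold Spec_dhandapatha; infer_instance

-- ===== CLAIM (what is proved, stated in full; the proofs are below) =====
def Claim_equal_dhandapatha : Prop := ∀ (s : String), Dom_dhandapatha s → Pre_dhandapatha s → Spec_dhandapatha s (dhandapatha s)

-- ===== LEMMAS AND PROOFS =====
theorem dhandapatha_core (sm : List String) (h : 6 ≤ sm.length) :
    (PySem.List.pyRange 0 4 1).foldl (fun x i =>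
      let gh : List String := []
      if i == 0 then
        let gh := gh ++ [pvGetA sm i] ++ [pvGetA sm (i+1)]
                 ++ [pvGetA sm (i+1)] ++ [pvGetA sm i]
                 ++ [pvGetA sm i] ++ [pvGetA sm (i+1)] ++ [pvGetA sm (i+2)]
                 ++ [pvGetA sm (i+2)] ++ [pvGetA sm (i+1)] ++ [pvGetA sm i]
        x ++ [gh]
      else if i == 1 then
        let gh := gh ++ [pvGetA sm (i-1)] ++ [pvGetA sm i]
                 ++ [pvGetA sm i] ++ [pvGetA sm (i+1)]
                 ++ [pvGetA sm (i+1)] ++ [pvGetA sm (i+2)]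
                 ++ [pvGetA sm (i+2)] ++ [pvGetA sm (i+1)] ++ [pvGetA sm i] ++ [pvGetA sm (i-1)]
                 ++ [pvGetA sm (i-1)] ++ [pvGetA sm i]
                 ++ [pvGetA sm i] ++ [pvGetA sm (i+1)]
        x ++ [gh]
      else if i == 2 then
        let gh := gh ++ [pvGetA sm i] ++ [pvGetA sm (i+1)] ++ [pvGetA sm (i+1)] ++ [pvGetA sm (i+2)]
                 ++ [pvGetA sm (i+2)] ++ [pvGetA sm (i+1)] ++ [pvGetA sm i] ++ [pvGetA sm (i-1)] ++ [pvGetA sm (i-2)]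
        x ++ [gh]
      else if i == 3 then
        let gh := gh ++ [pvGetA sm (i-3)] ++ [pvGetA sm (i-2)]
                 ++ [pvGetA sm (i-2)] ++ [pvGetA sm (i-1)]
                 ++ [pvGetA sm (i-1)] ++ [pvGetA sm i]
                 ++ [pvGetA sm i] ++ [pvGetA sm (i+1)]
                 ++ [pvGetA sm (i+1)] ++ [pvGetA sm (i+2)]
                 ++ [pvGetA sm (i+2)] ++ [pvGetA sm (i+1)] ++ [pvGetA sm i] ++ [pvGetA sm (i-1)]
                 ++ [pvGetA sm (i-2)] ++ [pvGetA sm (i-3)]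
        x ++ [gh]
      else x) []
    = [ pvPairs sm 0 1 ++ pvDn sm 0 1 ++ pvUp sm 0 2 ++ pvDn sm 0 2,
        pvPairs sm 0 3 ++ pvDn sm 0 3 ++ pvPairs sm 0 2,
        pvPairs sm 2 4 ++ pvDn sm 0 4,
        pvPairs sm 0 5 ++ pvDn sm 0 5 ] := by
  match sm, h with
  | a :: b :: c :: d :: e :: f :: rest, _ =>
    have e0 : PySem.List.pyGet? (a :: b :: c :: d :: e :: f :: rest) 0 = some a := by
      rw [show (0:Int) = ((0:Nat):Int) from rfl, PySem.List.pyGet?_natCast]; rfl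
    have e1 : PySem.List.pyGet? (a :: b :: c :: d :: e :: f :: rest) 1 = some b := by
      rw [show (1:Int) = ((1:Nat):Int) from rfl, PySem.List.pyGet?_natCast]; rfl
    have e2 : PySem.List.pyGet? (a :: b :: c :: d :: e :: f :: rest) 2 = some c := by
      rw [show (2:Int) = ((2:Nat):Int) from rfl, PySem.List.pyGet?_natCast]; rfl
    have e3 : PySem.List.pyGet? (a :: b :: c :: d :: e :: f :: rest) 3 = some d := by
      rw [show (3:Int) = ((3:Nat):Int) from rfl, PySem.List.pyGet?_natCast]; rfl
    have e4 : PySem.List.pyGet? (a :: b :: c :: d :: e :: f :: rest) 4 = some e := by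
      rw [show (4:Int) = ((4:Nat):Int) from rfl, PySem.List.pyGet?_natCast]; rfl
    have e5 : PySem.List.pyGet? (a :: b :: c :: d :: e :: f :: rest) 5 = some f := by
      rw [show (5:Int) = ((5:Nat):Int) from rfl, PySem.List.pyGet?_natCast]; rfl
    have n02 : PySem.List.slice (a :: b :: c :: d :: e :: f :: rest) none (some 2)
        = [a, b] := by
      rw [show (2:Int) = ((2:Nat):Int) from rfl, PySem.List.slice_to_natCast]; rfl
    have s03 : PySem.List.slice (a :: b :: c :: d :: e :: f :: rest) (some 0) (some 3)
        = [a, b, c] := by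
      rw [show (0:Int) = ((0:Nat):Int) from rfl, show (3:Int) = ((3:Nat):Int) from rfl,
        PySem.List.slice_natCast]; rfl
    have s04 : PySem.List.slice (a :: b :: c :: d :: e :: f :: rest) (some 0) (some 4)
        = [a, b, c, d] := by
      rw [show (0:Int) = ((0:Nat):Int) from rfl, show (4:Int) = ((4:Nat):Int) from rfl,
        PySem.List.slice_natCast]; rfl
    have s05 : PySem.List.slice (a :: b :: c :: d :: e :: f :: rest) (some 0) (some 5)
        = [a, b, c, d, e] := by
      rw [show (0:Int) = ((0:Nat):Int) from rfl, show (5:Int) = ((5:Nat):Int) from rfl,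
        PySem.List.slice_natCast]; rfl
    have s06 : PySem.List.slice (a :: b :: c :: d :: e :: f :: rest) (some 0) (some 6)
        = [a, b, c, d, e, f] := by
      rw [show (0:Int) = ((0:Nat):Int) from rfl, show (6:Int) = ((6:Nat):Int) from rfl,
        PySem.List.slice_natCast]; rfl
    simp [PySem.List.pyRange, List.range_succ, pvGetA, pvUp, pvDn, pvPairs,
      e0, e1, e2, e3, e4, e5, pvGetB, n02, s03, s04, s05, s06,
      show (0:Int)+1 = 1 from rfl, show (0:Int)+2 = 2 from rfl, show (1:Int)+1 = 2 from rfl,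
      show (1:Int)+2 = 3 from rfl, show (2:Int)+1 = 3 from rfl, show (2:Int)+2 = 4 from rfl,
      show (3:Int)+1 = 4 from rfl, show (3:Int)+2 = 5 from rfl, show (4:Int)+1 = 5 from rfl,
      show (5:Int)+1 = 6 from rfl]

-- ===== VERDICT (by name: the statement is the Claim_ definition above) =====
theorem dhandapatha_spec : Claim_equal_dhandapatha := by
  intro s _ hpre
  unfold Spec_dhandapatha dhandapatha dhandapatha_alt
  exact dhandapatha_core _ hpre
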